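-- pv_equiv track=rewrite | github.com/EstamelGG/EveSDE | marketGroups_handler.py | get_icon_for_group
-- ===== SOURCE A (Python) =====
-- def get_icon_for_group(group_id, children_map, group_info, visited=None):
--     """使用缓存的数据递归查找组的图标"""
--     if visited is None:
--         visited = set()
--
--     if group_id in visited:
--         return None
--     visited.add(group_id)
--
--     # 检查当前组的图标
--     current_icon = group_info[group_id]['icon_name']
--     if current_icon:
--         return current_icon
--
--     # 检查子组的图标
--     for child_id in children_map[group_id]:
--         child_icon = get_icon_for_group(child_id, children_map, group_info, visited)
--         if child_icon:
--             return child_icon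
--
--     return None
-- ===== SOURCE B (Python) =====
-- def get_icon_for_group(group_id, children_map, group_info, visited=None):
--     """Iterative pre-order DFS with an explicit stack instead of recursion."""
--     if visited is None:
--         visited = set()
--     stack = [group_id]
--     while stack:
--         node = stack.pop()
--         if node in visited:
--             continue
--         visited.add(node)
--         icon = group_info[node]['icon_name']
--         if icon:
--             return icon
--         stack.extend(reversed(children_map[node]))
--     return None
-- ===== Notes on version B (the rewrite author's own statement) =====
-- stated objective: alternative
-- what changed: Recursion replaced by an iterative pre-order DFS with an explicit stack (children pushed in reverse, nodes marked visited on pop), preserving visitation order, visited-set mutation and per-node key-access order.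
import Mathlib
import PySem

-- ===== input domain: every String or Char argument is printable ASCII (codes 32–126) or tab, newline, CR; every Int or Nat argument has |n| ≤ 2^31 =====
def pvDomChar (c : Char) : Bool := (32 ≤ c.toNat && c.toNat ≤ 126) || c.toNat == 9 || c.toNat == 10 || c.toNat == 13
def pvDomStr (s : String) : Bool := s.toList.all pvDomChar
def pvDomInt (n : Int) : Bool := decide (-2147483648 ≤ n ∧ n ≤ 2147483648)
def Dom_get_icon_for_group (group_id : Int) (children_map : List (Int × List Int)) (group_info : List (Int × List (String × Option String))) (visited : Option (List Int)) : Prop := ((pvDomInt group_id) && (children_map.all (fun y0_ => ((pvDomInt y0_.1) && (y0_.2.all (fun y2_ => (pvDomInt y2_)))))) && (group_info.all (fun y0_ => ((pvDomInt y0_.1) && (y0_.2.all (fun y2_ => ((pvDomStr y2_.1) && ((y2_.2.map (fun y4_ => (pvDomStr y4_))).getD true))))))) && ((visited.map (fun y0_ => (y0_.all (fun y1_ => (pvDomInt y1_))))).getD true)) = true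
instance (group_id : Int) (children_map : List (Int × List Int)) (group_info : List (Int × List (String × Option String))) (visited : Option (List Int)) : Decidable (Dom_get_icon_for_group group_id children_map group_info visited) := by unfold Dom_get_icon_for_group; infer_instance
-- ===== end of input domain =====

-- ===== PORT A =====
-- B replaces A's recursion by an iterative pre-order DFS with an explicit stack (alternative
-- decomposition, same cost).  Both A and B mutate the caller's `visited` set identically in
-- Python; the equivalence proved here is about the return value.
-- A Python KeyError propagates out of the whole call, so both ports thread exceptions as
-- `none` in an Option-wrapped result (`none` = KeyError, `some r` = normal return r);
-- the top-level defs collapse the KeyError case (excluded by Pre_) to `none : Option String`.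

-- Python truthiness of the icon value (a str or None)
def pvTruthy : Option String → Bool
  | none => false
  | some s => !(s == "")

-- A's recursion with the mutated `visited` set threaded as state; `fuel` only makes the
-- recursion structural (it is never exhausted: depth ≤ number of group_info entries + 1).
mutual
def pvGoA (cm : List (Int × List Int)) (gi : List (Int × List (String × Option String))) :
    Nat → Int → PySem.Set Int → Option (Option String × PySem.Set Int)
  | 0, _, _ => none
  | f + 1, gid, v =>
    if PySem.Set.contains v gid then some (none, v)
    else
      let v' := PySem.Set.add v gid
      match (PySem.Dict.mk gi).get? gid with
      | none => none                -- Python KeyError propagates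
      | some info =>
        match (PySem.Dict.mk info).get? "icon_name" with
        | none => none              -- Python KeyError propagates
        | some cur =>
          if pvTruthy cur then some (cur, v')
          else
            match (PySem.Dict.mk cm).get? gid with
            | none => none          -- Python KeyError propagates
            | some ch => pvLoopA cm gi f ch v'
  termination_by f _ _ => (f, 0)

def pvLoopA (cm : List (Int × List Int)) (gi : List (Int × List (String × Option String))) :
    Nat → List Int → PySem.Set Int → Option (Option String × PySem.Set Int)
  | _, [], v => some (none, v)
  | f, c :: cs, v =>
    match pvGoA cm gi f c v with
    | none => none                  -- child's KeyError propagates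
    | some p => if pvTruthy p.1 then some p else pvLoopA cm gi f cs p.2
  termination_by f cs _ => (f, cs.length + 1)
end

def get_icon_for_group (group_id : Int) (children_map : List (Int × List Int)) (group_info : List (Int × List (String × Option String))) (visited : Option (List Int)) : Option String :=
  match pvGoA children_map group_info (group_info.length + 1) group_id
      (PySem.Set.ofList (visited.getD [])) with
  | none => none                    -- Python raises KeyError here: excluded by Pre_
  | some p => p.1

-- ===== PORT B =====
-- the stack is a list with the top at the head; `stack.extend(reversed(ch))` therefore puts
-- ch's head on top, i.e. the new stack is ch ++ rest.  `fuel` only makes the loop structural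
-- (never exhausted: iterations ≤ 2 + total length of children_map's value lists,
-- counting the final empty-stack check).
def pvLoopB (cm : List (Int × List Int)) (gi : List (Int × List (String × Option String))) :
    Nat → List Int → PySem.Set Int → Option (Option String)
  | 0, _, _ => none
  | f + 1, stack, v =>
    match stack with
    | [] => some none
    | node :: rest =>
      if PySem.Set.contains v node then pvLoopB cm gi f rest v
      else
        let v' := PySem.Set.add v node
        match (PySem.Dict.mk gi).get? node with
        | none => none              -- Python KeyError propagates
        | some info =>
          match (PySem.Dict.mk info).get? "icon_name" with
          | none => none            -- Python KeyError propagates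
          | some icon =>
            if pvTruthy icon then some icon
            else
              match (PySem.Dict.mk cm).get? node with
              | none => none        -- Python KeyError propagates
              | some ch => pvLoopB cm gi f (ch ++ rest) v'

def get_icon_for_group_alt (group_id : Int) (children_map : List (Int × List Int)) (group_info : List (Int × List (String × Option String))) (visited : Option (List Int)) : Option String :=
  match pvLoopB children_map group_info ((children_map.map (fun p => p.2.length)).sum + 2)
      [group_id] (PySem.Set.ofList (visited.getD [])) with
  | none => none                    -- Python raises KeyError here: excluded by Pre_
  | some o => o

-- ===== PRECONDITION & SPEC =====
-- a node is key-safe: its group_info entry exists with an 'icon_name' key and, when that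
-- icon is falsy (so children_map would be read from it), its children_map entry exists too;
-- a node already in the caller's visited set is never read at all
def pvSafe (cm : List (Int × List Int)) (gi : List (Int × List (String × Option String))) (vis0 : List Int) (n : Int) : Bool :=
  vis0.contains n ||
  (match (PySem.Dict.mk gi).get? n with
   | none => false
   | some info =>
     match (PySem.Dict.mk info).get? "icon_name" with
     | none => false
     | some cur => pvTruthy cur || ((PySem.Dict.mk cm).get? n).isSome)

-- the traversal can step from n into its children: n is unvisited, key-safe and icon-less
def pvExpandable (cm : List (Int × List Int)) (gi : List (Int × List (String × Option String))) (vis0 : List Int) (n : Int) : Bool :=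
  !(vis0.contains n) &&
  (match (PySem.Dict.mk gi).get? n with
   | none => false
   | some info =>
     match (PySem.Dict.mk info).get? "icon_name" with
     | none => false
     | some cur => !pvTruthy cur && ((PySem.Dict.mk cm).get? n).isSome)

-- generic reachable-set closure of the children relation (plain graph reachability: no
-- traversal order, no early exit, no growing visited set — not a re-run of either DFS);
-- 1 + total children count bounds the number of distinct reachable nodes, so iterating the
-- one-step expansion that often reaches the closure
def pvStep (cm : List (Int × List Int)) (gi : List (Int × List (String × Option String))) (vis0 : List Int) (S : List Int) : List Int :=
  (S ++ (S.filter (pvExpandable cm gi vis0)).flatMap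
      (fun n => ((PySem.Dict.mk cm).get? n).getD [])).dedup

def pvClosure (cm : List (Int × List Int)) (gi : List (Int × List (String × Option String))) (vis0 : List Int) (gid : Int) : List Int :=
  (pvStep cm gi vis0)^[(cm.map (fun p => p.2.length)).sum + 1] [gid]

-- Pre_ excludes exactly the inputs on which A raises KeyError, over-approximated in closed
-- form by plain graph reachability: every node reachable from group_id must be key-safe.
-- Reachability ignores the DFS's left-to-right early exit, so Pre_ also excludes some inputs
-- on which A finds an icon before reaching a node with missing keys and returns normally
-- (cited example); B behaves identically to A on all of them.
def Pre_get_icon_for_group (group_id : Int) (children_map : List (Int × List Int)) (group_info : List (Int × List (String × Option String))) (visited : Option (List Int)) : Prop :=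
  ∀ n ∈ pvClosure children_map group_info (visited.getD []) group_id,
    pvSafe children_map group_info (visited.getD []) n = true

instance (group_id : Int) (children_map : List (Int × List Int)) (group_info : List (Int × List (String × Option String))) (visited : Option (List Int)) : Decidable (Pre_get_icon_for_group group_id children_map group_info visited) := by unfold Pre_get_icon_for_group; infer_instance

def pvWitness_get_icon_for_group : Int × (List (Int × List Int)) × (List (Int × List (String × Option String))) × Option (List Int) :=
  (1, [(1, [2]), (2, [])], [(1, [("icon_name", none)]), (2, [("icon_name", some "ic")])], none)

def Spec_get_icon_for_group (group_id : Int) (children_map : List (Int × List Int)) (group_info : List (Int × List (String × Option String))) (visited : Option (List Int)) (out : Option String) : Prop := out = get_icon_for_group_alt group_id children_map group_info visited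
instance (group_id : Int) (children_map : List (Int × List Int)) (group_info : List (Int × List (String × Option String))) (visited : Option (List Int)) (out : Option String) : Decidable (Spec_get_icon_for_group group_id children_map group_info visited out) := by unfold Spec_get_icon_for_group; infer_instance

-- ===== CLAIM (what is proved, stated in full; the proofs are below) =====
def Claim_equal_get_icon_for_group : Prop := ∀ (group_id : Int) (children_map : List (Int × List Int)) (group_info : List (Int × List (String × Option String))) (visited : Option (List Int)), Dom_get_icon_for_group group_id children_map group_info visited → Pre_get_icon_for_group group_id children_map group_info visited → Spec_get_icon_for_group group_id children_map group_info visited (get_icon_for_group group_id children_map group_info visited)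

-- ===== LEMMAS AND PROOFS =====
-- Because both ports propagate the KeyError as `none`, they agree on ALL inputs; the
-- equivalence below is proved without using Pre_ (Pre_'s role is to delimit the inputs on
-- which the Python programs return rather than raise).

-- number of group_info entries whose key is not yet visited (fuel bound for A's recursion)
def pvKa (gi : List (Int × List (String × Option String))) (v : PySem.Set Int) : Nat :=
  (gi.filter (fun p => !(PySem.Set.contains v p.1))).length

-- total children count over unvisited children_map entries (fuel bound for B's loop)
def pvSb (cm : List (Int × List Int)) (v : PySem.Set Int) : Nat :=
  ((cm.filter (fun p => !(PySem.Set.contains v p.1))).map (fun p => p.2.length)).sum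

lemma pv_contains_add (v : PySem.Set Int) (x y : Int) :
    PySem.Set.contains (PySem.Set.add v x) y = (PySem.Set.contains v y || y == x) := by
  rw [Bool.eq_iff_iff]; simp [PySem.Set.mem_add]

lemma pv_filter_len_mono {α : Type} (l : List α) (p q : α → Bool)
    (h : ∀ a, q a = true → p a = true) : (l.filter q).length ≤ (l.filter p).length := by
  induction l with
  | nil => simp
  | cons a t ih =>
    simp only [List.filter_cons]
    by_cases hq : q a = true
    · simp [hq, h a hq]
      exact ih
    · have hq' : q a = false := by simpa using hq
      by_cases hp : p a = true
      · simp [hq', hp]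
        exact Nat.le_succ_of_le ih
      · simpa [hq', hp] using ih

lemma pv_filter_sum_mono {α : Type} (l : List α) (p q : α → Bool) (f : α → Nat)
    (h : ∀ a, q a = true → p a = true) :
    ((l.filter q).map f).sum ≤ ((l.filter p).map f).sum := by
  induction l with
  | nil => simp
  | cons a t ih =>
    simp only [List.filter_cons]
    by_cases hq : q a = true
    · simp [hq, h a hq]
      exact ih
    · have hq' : q a = false := by simpa using hq
      by_cases hp : p a = true
      · simp [hq', hp]
        exact le_trans ih (Nat.le_add_left _ _)
      · simpa [hq', hp] using ih

lemma pvKa_anti (gi : List (Int × List (String × Option String))) (v w : PySem.Set Int)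
    (h : ∀ x, PySem.Set.contains v x = true → PySem.Set.contains w x = true) :
    pvKa gi w ≤ pvKa gi v := by
  apply pv_filter_len_mono
  intro a ha
  simp only [Bool.not_eq_true'] at ha ⊢
  by_cases hv : PySem.Set.contains v a.1 = true
  · rw [h a.1 hv] at ha; exact absurd ha (by decide)
  · simpa using hv

lemma pvSb_anti (cm : List (Int × List Int)) (v w : PySem.Set Int)
    (h : ∀ x, PySem.Set.contains v x = true → PySem.Set.contains w x = true) :
    pvSb cm w ≤ pvSb cm v := by
  apply pv_filter_sum_mono
  intro a ha
  simp only [Bool.not_eq_true'] at ha ⊢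
  by_cases hv : PySem.Set.contains v a.1 = true
  · rw [h a.1 hv] at ha; exact absurd ha (by decide)
  · simpa using hv

lemma pv_contains_add_le_ka (gi : List (Int × List (String × Option String)))
    (v : PySem.Set Int) (x : Int) : pvKa gi (PySem.Set.add v x) ≤ pvKa gi v := by
  apply pvKa_anti
  intro y hy
  exact (PySem.Set.contains_iff _ _).mpr ((PySem.Set.mem_add _ _ _).mpr
    (Or.inl ((PySem.Set.contains_iff _ _).mp hy)))

lemma pv_contains_add_le_sb (cm : List (Int × List Int))
    (v : PySem.Set Int) (x : Int) : pvSb cm (PySem.Set.add v x) ≤ pvSb cm v := by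
  apply pvSb_anti
  intro y hy
  exact (PySem.Set.contains_iff _ _).mpr ((PySem.Set.mem_add _ _ _).mpr
    (Or.inl ((PySem.Set.contains_iff _ _).mp hy)))

lemma pv_contains_add_self (v : PySem.Set Int) (gid : Int) :
    PySem.Set.contains (PySem.Set.add v gid) gid = true := by
  rw [pv_contains_add]; simp

lemma pvKa_add_lt (gi : List (Int × List (String × Option String))) (gid : Int)
    (info : List (String × Option String)) (v : PySem.Set Int)
    (hg : (PySem.Dict.mk gi).get? gid = some info)
    (hc : PySem.Set.contains v gid = false) :
    pvKa gi (PySem.Set.add v gid) < pvKa gi v := by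
  induction gi with
  | nil => exact absurd hg (by simp [PySem.Dict.get?])
  | cons a t ih =>
    obtain ⟨k, i⟩ := a
    rw [PySem.Dict.get?_mk_cons] at hg
    simp only [pvKa, List.filter_cons]
    by_cases hk : (k == gid) = true
    · have hkeq : k = gid := by simpa using hk
      subst hkeq
      simp only [hc, pv_contains_add_self, Bool.not_false, Bool.not_true, Bool.false_eq_true,
        if_true, if_false, List.length_cons]
      exact Nat.lt_succ_of_le (pv_contains_add_le_ka t v k)
    · have hkne : (k == gid) = false := by simpa using hk
      rw [hkne] at hg; simp only [Bool.false_eq_true, if_false] at hg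
      have hg' := hg
      have hcc : PySem.Set.contains (PySem.Set.add v gid) k = PySem.Set.contains v k := by
        rw [pv_contains_add, hkne]; simp
      rw [hcc]
      by_cases hv : (!PySem.Set.contains v k) = true
      · simp only [hv, if_true, List.length_cons]
        exact Nat.succ_lt_succ (ih hg')
      · simp only [Bool.not_eq_true] at hv
        simp only [hv]
        exact ih hg'

lemma pvSb_add_drop (cm : List (Int × List Int)) (gid : Int) (ch : List Int)
    (v : PySem.Set Int) (hg : (PySem.Dict.mk cm).get? gid = some ch)
    (hc : PySem.Set.contains v gid = false) :
    ch.length + pvSb cm (PySem.Set.add v gid) ≤ pvSb cm v := by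
  induction cm with
  | nil => exact absurd hg (by simp [PySem.Dict.get?])
  | cons a t ih =>
    obtain ⟨k, l⟩ := a
    rw [PySem.Dict.get?_mk_cons] at hg
    simp only [pvSb, List.filter_cons]
    by_cases hk : (k == gid) = true
    · have hkeq : k = gid := by simpa using hk
      subst hkeq
      have hl : l = ch := by simpa using hg
      subst hl
      simp only [hc, pv_contains_add_self, Bool.not_false, Bool.not_true, Bool.false_eq_true,
        if_true, if_false, List.map_cons, List.sum_cons]
      have := pv_contains_add_le_sb t v k
      simp only [pvSb] at this
      omega
    · have hkne : (k == gid) = false := by simpa using hk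
      rw [hkne] at hg; simp only [Bool.false_eq_true, if_false] at hg
      have hcc : PySem.Set.contains (PySem.Set.add v gid) k = PySem.Set.contains v k := by
        rw [pv_contains_add, hkne]; simp
      rw [hcc]
      by_cases hv : (!PySem.Set.contains v k) = true
      · simp only [hv, if_true, List.map_cons, List.sum_cons]
        have := ih hg
        simp only [pvSb] at this
        omega
      · simp only [Bool.not_eq_true] at hv
        simp only [hv]
        exact ih hg

lemma pvLoopA_nil (cm : List (Int × List Int)) (gi : List (Int × List (String × Option String)))
    (f : Nat) (v : PySem.Set Int) : pvLoopA cm gi f [] v = some (none, v) := by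
  cases f <;> simp [pvLoopA]

lemma pvLoopB_nil (cm : List (Int × List Int)) (gi : List (Int × List (String × Option String)))
    (f : Nat) (v : PySem.Set Int) : pvLoopB cm gi (f + 1) [] v = some none := by
  simp [pvLoopB]

lemma pvLoopA_append (cm : List (Int × List Int)) (gi : List (Int × List (String × Option String)))
    (f : Nat) (xs ys : List Int) (v : PySem.Set Int) :
    pvLoopA cm gi f (xs ++ ys) v =
      (match pvLoopA cm gi f xs v with
       | none => none
       | some p => if pvTruthy p.1 then some p else pvLoopA cm gi f ys p.2) := by
  induction xs generalizing v with
  | nil => simp [pvLoopA_nil, pvTruthy]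
  | cons c cs ih =>
    simp only [List.cons_append, pvLoopA]
    rcases hg : pvGoA cm gi f c v with _ | p
    · rfl
    · by_cases ht : pvTruthy p.1 = true
      · simp [ht]
      · simp only [Bool.not_eq_true] at ht
        simp [ht, ih]

lemma pv_grow_loop (cm : List (Int × List Int)) (gi : List (Int × List (String × Option String)))
    (f : Nat)
    (hgo : ∀ (gid : Int) (v : PySem.Set Int) (p : Option String × PySem.Set Int) (x : Int),
      pvGoA cm gi f gid v = some p → PySem.Set.contains v x = true →
      PySem.Set.contains p.2 x = true) :
    ∀ (cs : List Int) (v : PySem.Set Int) (p : Option String × PySem.Set Int) (x : Int),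
      pvLoopA cm gi f cs v = some p → PySem.Set.contains v x = true →
      PySem.Set.contains p.2 x = true := by
  intro cs
  induction cs with
  | nil =>
    intro v p x hp hx
    rw [pvLoopA_nil] at hp
    cases hp
    simpa using hx
  | cons c cs ihc =>
    intro v p x hp hx
    rcases hg : pvGoA cm gi f c v with _ | q
    · simp [pvLoopA, hg] at hp
    · simp only [pvLoopA, hg] at hp
      cases ht : pvTruthy q.1
      · rw [ht] at hp; simp only [Bool.false_eq_true, if_false] at hp
        exact ihc _ p x hp (hgo c v q x hg hx)
      · rw [ht] at hp; simp only [if_true, Option.some.injEq] at hp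
        exact hp ▸ hgo c v q x hg hx

lemma pv_grow (cm : List (Int × List Int)) (gi : List (Int × List (String × Option String))) :
    ∀ (f : Nat) (gid : Int) (v : PySem.Set Int) (p : Option String × PySem.Set Int) (x : Int),
      pvGoA cm gi f gid v = some p → PySem.Set.contains v x = true →
      PySem.Set.contains p.2 x = true := by
  intro f
  induction f with
  | zero => intro gid v p x hp _; simp [pvGoA] at hp
  | succ n ihn =>
    intro gid v p x hp hx
    cases hcv : PySem.Set.contains v gid
    case true =>
      simp only [pvGoA, hcv, if_true, Option.some.injEq] at hp
      rw [← hp]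
      simpa using hx
    case false =>
      have hx' : PySem.Set.contains (PySem.Set.add v gid) x = true := by
        rw [pv_contains_add, hx]; simp
      simp only [pvGoA, hcv, Bool.false_eq_true, if_false] at hp
      rcases hgi : (PySem.Dict.mk gi).get? gid with _ | info
      · simp [hgi] at hp
      · simp only [hgi] at hp
        rcases hic : (PySem.Dict.mk info).get? "icon_name" with _ | cur
        · simp [hic] at hp
        · simp only [hic] at hp
          cases ht : pvTruthy cur
          case true =>
            rw [ht] at hp; simp only [if_true, Option.some.injEq] at hp
            subst hp
            simpa using hx'
          case false =>
            rw [ht] at hp; simp only [Bool.false_eq_true, if_false] at hp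
            rcases hcm : (PySem.Dict.mk cm).get? gid with _ | ch
            · simp [hcm] at hp
            · simp only [hcm] at hp
              exact pv_grow_loop cm gi n ihn ch _ p x hp hx'

lemma pvKa_goA_le (cm : List (Int × List Int)) (gi : List (Int × List (String × Option String)))
    (f : Nat) (gid : Int) (v : PySem.Set Int) (p : Option String × PySem.Set Int)
    (hp : pvGoA cm gi f gid v = some p) : pvKa gi p.2 ≤ pvKa gi v :=
  pvKa_anti gi v _ (fun x hx => pv_grow cm gi f gid v p x hp hx)

lemma pvKa_loopA_le (cm : List (Int × List Int)) (gi : List (Int × List (String × Option String)))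
    (f : Nat) (cs : List Int) (v : PySem.Set Int) (p : Option String × PySem.Set Int)
    (hp : pvLoopA cm gi f cs v = some p) : pvKa gi p.2 ≤ pvKa gi v :=
  pvKa_anti gi v _ (fun x hx => pv_grow_loop cm gi f (pv_grow cm gi f) cs v p x hp hx)

lemma pv_irrel_loop (cm : List (Int × List Int)) (gi : List (Int × List (String × Option String)))
    (f f' : Nat)
    (hgo : ∀ gid v, 1 + pvKa gi v ≤ f → 1 + pvKa gi v ≤ f' →
      pvGoA cm gi f gid v = pvGoA cm gi f' gid v) :
    ∀ (cs : List Int) (v : PySem.Set Int), 1 + pvKa gi v ≤ f → 1 + pvKa gi v ≤ f' →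
      pvLoopA cm gi f cs v = pvLoopA cm gi f' cs v := by
  intro cs
  induction cs with
  | nil => intro v _ _; rw [pvLoopA_nil, pvLoopA_nil]
  | cons c cs ihc =>
    intro v h h'
    simp only [pvLoopA]
    rw [← hgo c v h h']
    rcases hg : pvGoA cm gi f c v with _ | p
    · simp [hg]
    · simp only [hg]
      cases ht : pvTruthy p.1
      · simp only [ht, Bool.false_eq_true, if_false]
        have hk := pvKa_goA_le cm gi f c v p hg
        exact ihc _ (by omega) (by omega)
      · simp [ht]

lemma pv_irrel (cm : List (Int × List Int)) (gi : List (Int × List (String × Option String))) :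
    ∀ (f f' : Nat) (gid : Int) (v : PySem.Set Int), 1 + pvKa gi v ≤ f → 1 + pvKa gi v ≤ f' →
      pvGoA cm gi f gid v = pvGoA cm gi f' gid v := by
  intro f
  induction f with
  | zero => intro f' gid v h _; exact absurd h (by omega)
  | succ n ihn =>
    intro f' gid v h h'
    obtain ⟨m, rfl⟩ : ∃ m, f' = m + 1 := ⟨f' - 1, by omega⟩
    cases hcv : PySem.Set.contains v gid
    case true =>
      have hmv : gid ∈ v := (PySem.Set.contains_iff _ _).mp hcv
      simp [pvGoA, hmv]
    case false =>
      have hmv : ¬ gid ∈ v := by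
        intro hh
        rw [(PySem.Set.contains_iff _ _).mpr hh] at hcv
        cases hcv
      rcases hgi : (PySem.Dict.mk gi).get? gid with _ | info
      · simp [pvGoA, hmv, hgi]
      · rcases hic : (PySem.Dict.mk info).get? "icon_name" with _ | cur
        · simp [pvGoA, hmv, hgi, hic]
        · cases ht : pvTruthy cur
          case true => simp [pvGoA, hmv, hgi, hic, ht]
          case false =>
            rcases hcm : (PySem.Dict.mk cm).get? gid with _ | ch
            · simp [pvGoA, hmv, hgi, hic, ht, hcm]
            · simp only [pvGoA, hcv, Bool.false_eq_true, if_false, hgi, hic, ht, hcm]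
              have hlt := pvKa_add_lt gi gid info v hgi hcv
              exact pv_irrel_loop cm gi n m (fun g w a b => ihn m g w a b) ch _
                (by omega) (by omega)

lemma pv_irrelL (cm : List (Int × List Int)) (gi : List (Int × List (String × Option String)))
    (f f' : Nat) (cs : List Int) (v : PySem.Set Int)
    (h : 1 + pvKa gi v ≤ f) (h' : 1 + pvKa gi v ≤ f') :
    pvLoopA cm gi f cs v = pvLoopA cm gi f' cs v :=
  pv_irrel_loop cm gi f f' (fun g w a b => pv_irrel cm gi f f' g w a b) cs v h h'

lemma pv_tr_loop (cm : List (Int × List Int)) (gi : List (Int × List (String × Option String)))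
    (f : Nat) : ∀ (cs : List Int) (v : PySem.Set Int) (p : Option String × PySem.Set Int),
      pvLoopA cm gi f cs v = some p → pvTruthy p.1 = false → p.1 = none := by
  intro cs
  induction cs with
  | nil =>
    intro v p hp _
    rw [pvLoopA_nil] at hp
    cases hp
    rfl
  | cons c cs ihc =>
    intro v p hp hf
    rcases hg : pvGoA cm gi f c v with _ | q
    · simp [pvLoopA, hg] at hp
    · simp only [pvLoopA, hg] at hp
      cases ht : pvTruthy q.1
      · rw [ht] at hp; simp only [Bool.false_eq_true, if_false] at hp
        exact ihc _ p hp hf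
      · rw [ht] at hp; simp only [if_true, Option.some.injEq] at hp
        rw [← hp, ht] at hf
        cases hf

lemma pv_tr_go (cm : List (Int × List Int)) (gi : List (Int × List (String × Option String)))
    (f : Nat) (gid : Int) (v : PySem.Set Int) (p : Option String × PySem.Set Int)
    (hp : pvGoA cm gi f gid v = some p) (hf : pvTruthy p.1 = false) : p.1 = none := by
  cases f with
  | zero => simp [pvGoA] at hp
  | succ n =>
    cases hcv : PySem.Set.contains v gid
    case true =>
      simp only [pvGoA, hcv, if_true, Option.some.injEq] at hp
      rw [← hp]
    case false =>
      simp only [pvGoA, hcv, Bool.false_eq_true, if_false] at hp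
      rcases hgi : (PySem.Dict.mk gi).get? gid with _ | info
      · simp [hgi] at hp
      · simp only [hgi] at hp
        rcases hic : (PySem.Dict.mk info).get? "icon_name" with _ | cur
        · simp [hic] at hp
        · simp only [hic] at hp
          cases ht : pvTruthy cur
          case true =>
            rw [ht] at hp; simp only [if_true, Option.some.injEq] at hp
            rw [← hp, ht] at hf
            cases hf
          case false =>
            rw [ht] at hp; simp only [Bool.false_eq_true, if_false] at hp
            rcases hcm : (PySem.Dict.mk cm).get? gid with _ | ch
            · simp [hcm] at hp
            · simp only [hcm] at hp
              exact pv_tr_loop cm gi n ch _ p hp hf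

lemma pvE (cm : List (Int × List Int)) (gi : List (Int × List (String × Option String))) :
    ∀ (fB : Nat) (stack : List Int) (v : PySem.Set Int) (fA : Nat),
      1 + pvKa gi v ≤ fA → stack.length + pvSb cm v + 1 ≤ fB →
      pvLoopB cm gi fB stack v = (pvLoopA cm gi fA stack v).map Prod.fst := by
  intro fB
  induction fB with
  | zero =>
    intro stack v fA hka hsb
    exact absurd hsb (by omega)
  | succ f ihf =>
    intro stack v fA hka hsb
    obtain ⟨a, rfl⟩ : ∃ a, fA = a + 1 := ⟨fA - 1, by omega⟩
    cases stack with
    | nil => rw [pvLoopB_nil, pvLoopA_nil]; rfl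
    | cons node rest =>
      have hsb1 : rest.length + pvSb cm v + 1 ≤ f := by
        simp only [List.length_cons] at hsb; omega
      cases hcv : PySem.Set.contains v node
      case true =>
        have hmv : node ∈ v := (PySem.Set.contains_iff _ _).mp hcv
        have hIH := ihf rest v (a + 1) hka hsb1
        simp [pvLoopB, hmv, pvLoopA, pvGoA, pvTruthy, hIH]
      case false =>
        have hmv : ¬ node ∈ v := by
          intro hh
          rw [(PySem.Set.contains_iff _ _).mpr hh] at hcv
          cases hcv
        rcases hgi : (PySem.Dict.mk gi).get? node with _ | info
        · simp [pvLoopB, pvLoopA, pvGoA, hmv, hgi]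
        · rcases hic : (PySem.Dict.mk info).get? "icon_name" with _ | cur
          · simp [pvLoopB, pvLoopA, pvGoA, hmv, hgi, hic]
          · cases ht : pvTruthy cur
            case true =>
              simp [pvLoopB, pvLoopA, pvGoA, hmv, hgi, hic, ht]
            case false =>
              rcases hcm : (PySem.Dict.mk cm).get? node with _ | ch
              · simp [pvLoopB, pvLoopA, pvGoA, hmv, hgi, hic, ht, hcm]
              · have hklt : pvKa gi (PySem.Set.add v node) < pvKa gi v :=
                  pvKa_add_lt gi node info v hgi hcv
                have hsdrop : ch.length + pvSb cm (PySem.Set.add v node) ≤ pvSb cm v :=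
                  pvSb_add_drop cm node ch v hcm hcv
                have hIH := ihf (ch ++ rest) (PySem.Set.add v node) a
                  (by omega) (by simp only [List.length_append]; omega)
                simp only [pvLoopB, hcv, Bool.false_eq_true, if_false, hgi, hic, ht, hcm]
                rw [hIH, pvLoopA_append]
                simp only [pvLoopA, pvGoA, hcv, Bool.false_eq_true, if_false,
                  hgi, hic, ht, hcm]
                rcases hq : pvLoopA cm gi a ch (PySem.Set.add v node) with _ | p
                · rfl
                · simp only [hq]
                  cases htq : pvTruthy p.1
                  · simp only [htq, Bool.false_eq_true, if_false]
                    have hkq : pvKa gi p.2 ≤ pvKa gi (PySem.Set.add v node) :=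
                      pvKa_loopA_le cm gi a ch _ p hq
                    rw [pv_irrelL cm gi a (a + 1) rest p.2 (by omega) (by omega)]
                  · simp [htq]

lemma pv_main (group_id : Int) (children_map : List (Int × List Int))
    (group_info : List (Int × List (String × Option String))) (visited : Option (List Int)) :
    get_icon_for_group group_id children_map group_info visited =
      get_icon_for_group_alt group_id children_map group_info visited := by
  unfold get_icon_for_group get_icon_for_group_alt
  set v0 := PySem.Set.ofList (visited.getD []) with hv0
  have hka : 1 + pvKa group_info v0 ≤ group_info.length + 1 := by
    have := List.length_filter_le (fun p => !(PySem.Set.contains v0 p.1)) group_info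
    simp only [pvKa]; omega
  have hsb : (1 : Nat) + pvSb children_map v0 + 1 ≤
      (children_map.map (fun p => p.2.length)).sum + 2 := by
    have hmono := pv_filter_sum_mono children_map (fun _ => true)
      (fun p => !(PySem.Set.contains v0 p.1)) (fun p => p.2.length) (by simp)
    simp only [List.filter_true] at hmono
    simp only [pvSb]; omega
  have hE := pvE children_map group_info
    ((children_map.map (fun p => p.2.length)).sum + 2) [group_id] v0
    (group_info.length + 1) hka (by simpa using hsb)
  rw [hE]
  rcases hg : pvGoA children_map group_info (group_info.length + 1) group_id v0 with _ | p
  · simp [pvLoopA, hg]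
  · cases ht : pvTruthy p.1
    · have hp1 : p.1 = none :=
        pv_tr_go children_map group_info (group_info.length + 1) group_id v0 p hg ht
      simp [pvLoopA, hg, ht, pvLoopA_nil, hp1, pvTruthy]
    · simp [pvLoopA, hg, ht]

-- ===== VERDICT (by name: the statement is the Claim_ definition above) =====
theorem get_icon_for_group_spec : Claim_equal_get_icon_for_group := by
  intro group_id children_map group_info visited _ _
  unfold Spec_get_icon_for_group
  exact pv_main group_id children_map group_info visited
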